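-- pv_equiv track=rewrite | github.com/abhinav-gautam/leetcode | Topicwise/Maths/3870. Count Commas in Range.py | countCommas
-- ===== SOURCE A (Python) =====
-- def countCommas(n: int) -> int:
--     commas = 0
--     start = 1000
--     comma_count = 1
--
--     while start <= n:
--         end = start * 1000 - 1
--         count = max(0, min(n, end) - start + 1)
--         commas += count * comma_count
--
--         start *= 1000
--         comma_count += 1
--
--     return commas
-- ===== SOURCE B (Python) =====
-- def countCommas(n: int) -> int:
--     # Closed form, no loop: K = (digits(n) - 1) // 3 is the number of commas in
--     # str(n)'s grouped form, i.e. the number of thresholds 1000^k <= n.  Each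
--     # threshold 1000^k contributes (n - 1000^k + 1) commas over 1..n, so the
--     # total is K*(n+1) minus the geometric sum 1000 + ... + 1000^K.
--     if n < 1000:
--         return 0
--     K = (len(str(n)) - 1) // 3
--     return K * (n + 1) - (1000 ** (K + 1) - 1000) // 999
-- ===== Notes on version B (the rewrite author's own statement) =====
-- stated objective: simpler
-- what changed: B replaces A's loop over magnitude bands by a closed form: the number of commas per number is read off the decimal length of n (K = (len(str(n))-1)//3) and the total is K*(n+1) minus a geometric series, with no loop at all.
import Mathlib
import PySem

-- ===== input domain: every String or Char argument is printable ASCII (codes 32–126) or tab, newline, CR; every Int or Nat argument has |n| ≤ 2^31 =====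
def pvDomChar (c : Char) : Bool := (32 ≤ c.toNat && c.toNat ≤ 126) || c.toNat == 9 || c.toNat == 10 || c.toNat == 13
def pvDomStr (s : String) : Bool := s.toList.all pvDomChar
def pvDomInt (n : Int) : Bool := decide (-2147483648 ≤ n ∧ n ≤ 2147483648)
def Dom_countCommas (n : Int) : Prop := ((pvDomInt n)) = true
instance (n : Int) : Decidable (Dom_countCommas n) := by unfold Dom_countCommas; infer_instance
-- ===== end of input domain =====

-- B replaces A's band-summing loop by a loop-free closed form read off len(str(n)) (objective: simpler).

-- ===== PORT A =====
-- A's while loop; the hypothesis 1000 ≤ start only justifies termination.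
def countCommasLoopA (n start commaCount commas : Int) (h : 1000 ≤ start) : Int :=
  if hle : start ≤ n then
    countCommasLoopA n (start * 1000) (commaCount + 1)
      (commas + (max 0 (min n (start * 1000 - 1) - start + 1)) * commaCount)
      (by nlinarith)
  else commas
termination_by (n + 1 - start).toNat
decreasing_by
  have : start + 999 * 1000 ≤ start * 1000 := by nlinarith
  omega

def countCommas (n : Int) : Int := countCommasLoopA n 1000 1 0 (by norm_num)

-- ===== PORT B =====
def countCommas_alt (n : Int) : Int :=
  if n < 1000 then 0
  else
    let K : Int := PySem.Int.floordiv (PySem.Str.len (PySem.Int.toStr n) - 1) 3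
    K * (n + 1) - PySem.Int.floordiv (1000 ^ (K + 1).toNat - 1000) 999

-- ===== PRECONDITION & SPEC =====
def Spec_countCommas (n : Int) (out : Int) : Prop := out = countCommas_alt n
instance (n : Int) (out : Int) : Decidable (Spec_countCommas n out) := by unfold Spec_countCommas; infer_instance

-- ===== CLAIM (what is proved, stated in full; the proofs are below) =====
def Claim_equal_countCommas : Prop := ∀ (n : Int), Dom_countCommas n → Spec_countCommas n (countCommas n)

-- ===== LEMMAS AND PROOFS =====

-- Lower length bound for Nat.toDigitsCore (Mathlib only provides the upper bound).
theorem toDigitsCore_length_lower (e : Nat) : ∀ (f n : Nat), e < f → 10 ^ e ≤ n →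
    e + 1 ≤ (Nat.toDigitsCore 10 f n []).length := by
  induction e with
  | zero =>
    intro f n hf hn
    obtain ⟨f', rfl⟩ : ∃ f', f = f' + 1 := ⟨f - 1, by omega⟩
    simp only [Nat.toDigitsCore]
    split
    · simp
    · rw [Nat.toDigitsCore_lens_eq]
      omega
  | succ e ih =>
    intro f n hf hn
    obtain ⟨f', rfl⟩ : ∃ f', f = f' + 1 := ⟨f - 1, by omega⟩
    have hdiv : 10 ^ e ≤ n / 10 := by
      rw [Nat.le_div_iff_mul_le (by norm_num)]
      calc 10 ^ e * 10 = 10 ^ (e + 1) := (pow_succ 10 e).symm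
        _ ≤ n := hn
    have hne : ¬ (n / 10 = 0) := by
      have : 1 ≤ 10 ^ e := Nat.one_le_pow _ _ (by norm_num)
      omega
    simp only [Nat.toDigitsCore]
    rw [if_neg hne, Nat.toDigitsCore_lens_eq]
    have := ih f' (n / 10) (by omega) hdiv
    omega

theorem toDigits_length_lower (e n : Nat) (hn : 10 ^ e ≤ n) :
    e + 1 ≤ (Nat.toDigits 10 n).length := by
  have he : e < 10 ^ e := Nat.lt_pow_self (by norm_num)
  exact toDigitsCore_length_lower e (n + 1) n (by omega) hn

theorem len_toStr_pos (n : Int) (hn : 0 < n) :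
    PySem.Str.len (PySem.Int.toStr n) = ((Nat.toDigits 10 n.toNat).length : Int) := by
  rw [PySem.Str.len_eq, PySem.Int.toList_toStr]
  unfold PySem.Int.toChars
  rw [if_neg (by omega)]

-- B's closed form evaluated band by band (the only place the 2^31 domain bound is used).
theorem B_closed (n : Int) (hub : n ≤ 2147483648) :
    countCommas_alt n =
      if n < 1000 then 0
      else if n < 1000000 then n - 999
      else if n < 1000000000 then 2 * n - 1000998
      else 3 * n - 1001000997 := by
  unfold countCommas_alt
  by_cases h1 : n < 1000
  · simp [h1]
  · rw [if_neg h1, if_neg h1]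
    have hpos : 0 < n := by omega
    rw [len_toStr_pos n hpos]
    by_cases h2 : n < 1000000
    · have hlo : 4 ≤ (Nat.toDigits 10 n.toNat).length := by
        have := toDigits_length_lower 3 n.toNat (by omega)
        omega
      have hhi : (Nat.toDigits 10 n.toNat).length ≤ 6 :=
        Nat.toDigits_length 10 n.toNat 6 (by norm_num) (by omega)
      have hK : PySem.Int.floordiv (((Nat.toDigits 10 n.toNat).length : Int) - 1) 3 = 1 := by
        rw [PySem.Int.floordiv_eq_ediv_of_pos (by norm_num)]
        omega
      rw [if_pos h2]
      simp only [hK]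
      rw [show ((1 : Int) + 1).toNat = 2 from rfl,
        show ((1000 : Int) ^ 2 - 1000) = 999000 from by norm_num,
        show PySem.Int.floordiv 999000 999 = 1000 from by decide]
      ring
    · rw [if_neg h2]
      by_cases h3 : n < 1000000000
      · have hlo : 7 ≤ (Nat.toDigits 10 n.toNat).length := by
          have := toDigits_length_lower 6 n.toNat (by omega)
          omega
        have hhi : (Nat.toDigits 10 n.toNat).length ≤ 9 :=
          Nat.toDigits_length 10 n.toNat 9 (by norm_num) (by omega)
        have hK : PySem.Int.floordiv (((Nat.toDigits 10 n.toNat).length : Int) - 1) 3 = 2 := by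
          rw [PySem.Int.floordiv_eq_ediv_of_pos (by norm_num)]
          omega
        rw [if_pos h3]
        simp only [hK]
        rw [show ((2 : Int) + 1).toNat = 3 from rfl,
          show ((1000 : Int) ^ 3 - 1000) = 999999000 from by norm_num,
          show PySem.Int.floordiv 999999000 999 = 1001000 from by decide]
        ring
      · have hlo : 10 ≤ (Nat.toDigits 10 n.toNat).length := by
          have := toDigits_length_lower 9 n.toNat (by omega)
          omega
        have hhi : (Nat.toDigits 10 n.toNat).length ≤ 10 :=
          Nat.toDigits_length 10 n.toNat 10 (by norm_num) (by omega)
        have hK : PySem.Int.floordiv (((Nat.toDigits 10 n.toNat).length : Int) - 1) 3 = 3 := by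
          rw [PySem.Int.floordiv_eq_ediv_of_pos (by norm_num)]
          omega
        rw [if_neg h3]
        simp only [hK]
        rw [show ((3 : Int) + 1).toNat = 4 from rfl,
          show ((1000 : Int) ^ 4 - 1000) = 999999999000 from by norm_num,
          show PySem.Int.floordiv 999999999000 999 = 1001001000 from by decide]
        ring

-- A's loop evaluated band by band: at most four iterations reach the 2^31 domain.
theorem A_closed (n : Int) (hub : n ≤ 2147483648) :
    countCommas n =
      if n < 1000 then 0
      else if n < 1000000 then n - 999
      else if n < 1000000000 then 2 * n - 1000998
      else 3 * n - 1001000997 := by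
  unfold countCommas
  rw [countCommasLoopA]
  by_cases h1 : (1000 : Int) ≤ n
  · rw [dif_pos h1, countCommasLoopA]
    norm_num
    by_cases h2 : (1000000 : Int) ≤ n
    · rw [if_pos h2, countCommasLoopA]
      norm_num
      by_cases h3 : (1000000000 : Int) ≤ n
      · rw [if_pos h3, countCommasLoopA]
        norm_num
        rw [if_neg (show ¬(1000000000000 : Int) ≤ n by omega)]
        rw [if_neg (by omega), if_neg (by omega), if_neg (by omega)]
        omega
      · rw [if_neg h3]
        rw [if_neg (by omega), if_neg (by omega), if_pos (by omega)]
        omega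
    · rw [if_neg h2]
      rw [if_neg (by omega), if_pos (by omega)]
      omega
  · rw [dif_neg h1, if_pos (by omega)]

-- ===== VERDICT (by name: the statement is the Claim_ definition above) =====
theorem countCommas_spec : Claim_equal_countCommas := by
  intro n hDom
  have hub : n ≤ 2147483648 := by
    have := of_decide_eq_true hDom
    exact this.2
  unfold Spec_countCommas
  rw [A_closed n hub, B_closed n hub]
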